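-- pv_equiv track=rewrite | github.com/dontBlamestorming/Algorithm | kakao-test/prize_hunter.py | get_prize_1st
-- ===== SOURCE A (Python) =====
-- def get_prize_1st(rank, lst):
--     prize_by_rank_1st = []
--
--     for i in range(1, len(lst) + 1):
--         for _ in range(i):
--             prize_by_rank_1st.append(lst[i - 1])
--
--     if 0 < rank <= len(prize_by_rank_1st):
--         return prize_by_rank_1st[rank - 1]
--     else:
--         return 0
-- ===== SOURCE B (Python) =====
-- def get_prize_1st(rank, lst):
--     r = rank
--     for k, prize in enumerate(lst, 1):
--         if 0 < r <= k:
--             return prize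
--         r -= k
--     return 0
-- ===== Notes on version B (the rewrite author's own statement) =====
-- stated objective: faster
-- what changed: Instead of materializing the n(n+1)/2-element expanded prize list and indexing it, B walks the list once, subtracting each block size k from the rank and returning the element whose block contains it.
import Mathlib
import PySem

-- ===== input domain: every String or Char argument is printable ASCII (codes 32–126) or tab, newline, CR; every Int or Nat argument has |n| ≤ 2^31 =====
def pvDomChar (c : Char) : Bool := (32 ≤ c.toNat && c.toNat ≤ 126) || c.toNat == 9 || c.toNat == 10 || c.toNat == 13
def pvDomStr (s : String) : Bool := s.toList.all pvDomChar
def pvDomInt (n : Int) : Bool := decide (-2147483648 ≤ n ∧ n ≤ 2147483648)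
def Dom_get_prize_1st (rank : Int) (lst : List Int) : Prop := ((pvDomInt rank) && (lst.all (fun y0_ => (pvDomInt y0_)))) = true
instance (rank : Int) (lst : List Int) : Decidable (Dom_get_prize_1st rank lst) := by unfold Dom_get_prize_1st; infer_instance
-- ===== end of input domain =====

-- B builds no expanded list: it walks lst once, subtracting each block size from the rank (O(n) instead of A's O(n^2)).

-- ===== PORT A =====
-- the doubly nested loop building prize_by_rank_1st, then the guarded index
def get_prize_1st (rank : Int) (lst : List Int) : Int :=
  let prize_by_rank_1st : List Int :=
    (PySem.List.pyRange 1 ((lst.length : Int) + 1) 1).foldl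
      (fun acc i =>
        (PySem.List.pyRange 0 i 1).foldl
          (fun acc2 _ => acc2 ++ [PySem.List.pyGetD lst (i - 1) 0]) acc)
      []
  if 0 < rank ∧ rank ≤ (prize_by_rank_1st.length : Int) then
    PySem.List.pyGetD prize_by_rank_1st (rank - 1) 0
  else 0

-- ===== PORT B =====
-- the 'for k, prize in enumerate(lst, 1)' loop of Source B, carrying the remaining rank r
def getPrizeAltLoop (k r : Int) : List Int → Int
  | [] => 0
  | prize :: rest => if 0 < r ∧ r ≤ k then prize else getPrizeAltLoop (k + 1) (r - k) rest

def get_prize_1st_alt (rank : Int) (lst : List Int) : Int :=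
  getPrizeAltLoop 1 rank lst

-- ===== PRECONDITION & SPEC =====
def Spec_get_prize_1st (rank : Int) (lst : List Int) (out : Int) : Prop := out = get_prize_1st_alt rank lst
instance (rank : Int) (lst : List Int) (out : Int) : Decidable (Spec_get_prize_1st rank lst out) := by unfold Spec_get_prize_1st; infer_instance

-- ===== CLAIM (what is proved, stated in full; the proofs are below) =====
def Claim_equal_get_prize_1st : Prop := ∀ (rank : Int) (lst : List Int), Dom_get_prize_1st rank lst → Spec_get_prize_1st rank lst (get_prize_1st rank lst)

-- ===== LEMMAS AND PROOFS =====

-- the expanded prize list A builds, described structurally: block k, then block k+1, …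
def pvBlocks (k : Nat) : List Int → List Int
  | [] => []
  | x :: xs => List.replicate k x ++ pvBlocks (k + 1) xs

theorem pvInnerLoop (x : Int) (i : Int) (acc : List Int) :
    (PySem.List.pyRange 0 i 1).foldl (fun acc2 _ => acc2 ++ [x]) acc
      = acc ++ List.replicate i.toNat x := by
  rw [PySem.List.pyRange_one, List.foldl_map]
  simp only [sub_zero]
  generalize i.toNat = n
  induction n generalizing acc with
  | zero => simp
  | succ n ih =>
    rw [List.range_succ, List.foldl_append, ih]
    simp [List.replicate_succ']

theorem pvOuterLoop (lst : List Int) (a : Nat) (acc : List Int) (ha : a ≤ lst.length) :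
    (PySem.List.pyRange ((a : Int) + 1) ((lst.length : Int) + 1) 1).foldl
      (fun acc i =>
        (PySem.List.pyRange 0 i 1).foldl (fun acc2 _ => acc2 ++ [PySem.List.pyGetD lst (i - 1) 0]) acc)
      acc
    = acc ++ pvBlocks (a + 1) (lst.drop a) := by
  induction h : lst.length - a generalizing a acc with
  | zero =>
    have : a = lst.length := by omega
    subst this
    rw [PySem.List.pyRange_one_eq_nil (by omega)]
    simp [pvBlocks]
  | succ n ih =>
    have hlt : a < lst.length := by omega
    rw [PySem.List.pyRange_one_cons (by omega)]
    rw [List.foldl_cons]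
    rw [pvInnerLoop]
    have hget : PySem.List.pyGetD lst ((a : Int) + 1 - 1) 0 = lst[a] := by
      rw [show ((a : Int) + 1 - 1) = (a : Int) by ring]
      rw [PySem.List.pyGetD_eq_getElem _ _ (by omega) (by omega)]
      simp
    rw [hget]
    have hcast : ((a : Int) + 1) = ((a + 1 : Nat) : Int) := by push_cast; ring
    rw [hcast, ih (a + 1) _ (by omega) (by omega)]
    have hdrop : lst.drop a = lst[a] :: lst.drop (a + 1) := List.drop_eq_getElem_cons hlt
    rw [hdrop]
    simp [pvBlocks, List.append_assoc]

-- B's loop reads the same answer off pvBlocks without building it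
theorem pvAltLoop_eq (lst : List Int) (k : Nat) (r : Int) (hk : 0 < k) :
    getPrizeAltLoop (k : Int) r lst
      = if 0 < r ∧ r ≤ ((pvBlocks k lst).length : Int) then
          PySem.List.pyGetD (pvBlocks k lst) (r - 1) 0
        else 0 := by
  induction lst generalizing k r with
  | nil => simp [getPrizeAltLoop, pvBlocks]
  | cons x xs ih =>
    rw [pvBlocks]
    rw [getPrizeAltLoop]
    by_cases h1 : 0 < r ∧ r ≤ (k : Int)
    · rw [if_pos h1]
      have hlen : ((List.replicate k x ++ pvBlocks (k + 1) xs).length : Int)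
          = (k : Int) + ((pvBlocks (k + 1) xs).length : Int) := by simp
      rw [if_pos ⟨h1.1, by rw [hlen]; omega⟩]
      rw [PySem.List.pyGetD_eq_getElem _ _ (by omega) (by simp; omega)]
      rw [List.getElem_append_left (by simp; omega)]
      simp
    · rw [if_neg h1]
      have hcast : ((k : Int) + 1) = ((k + 1 : Nat) : Int) := by push_cast; ring
      rw [hcast, ih (k + 1) (r - k) (by omega)]
      by_cases h2 : 0 < r - (k : Int) ∧ r - (k : Int) ≤ ((pvBlocks (k + 1) xs).length : Int)
      · rw [if_pos h2]
        have hlen2 : ((List.replicate k x ++ pvBlocks (k + 1) xs).length : Int)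
            = (k : Int) + ((pvBlocks (k + 1) xs).length : Int) := by simp
        rw [if_pos ⟨by omega, by rw [hlen2]; omega⟩]
        rw [PySem.List.pyGetD_eq_getElem (List.replicate k x ++ pvBlocks (k + 1) xs) 0 (by omega) (by rw [hlen2]; omega)]
        rw [PySem.List.pyGetD_eq_getElem (pvBlocks (k + 1) xs) 0 (by omega) (by omega)]
        rw [List.getElem_append_right (by simp; omega)]
        congr 1
        simp
        omega
      · rw [if_neg h2]
        rw [if_neg (by simp; omega)]

-- ===== VERDICT (by name: the statement is the Claim_ definition above) =====
theorem get_prize_1st_spec : Claim_equal_get_prize_1st := by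
  intro rank lst _
  unfold Spec_get_prize_1st get_prize_1st get_prize_1st_alt
  have hbuild := pvOuterLoop lst 0 [] (by omega)
  simp only [Nat.cast_zero, Int.zero_add, List.drop_zero, List.nil_append, Nat.zero_add] at hbuild
  have halt := pvAltLoop_eq lst 1 rank (by omega)
  simp only [Nat.cast_one] at halt
  simp only [hbuild, halt]
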